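-- pv_equiv track=rewrite | github.com/rmcoy2-maker/calculated-risk-beta-edition | .devcontainer/core_engine/etl/pull_stats.py | parse_weeks
-- ===== SOURCE A (Python) =====
-- def parse_weeks(spec: str) -> list[int]:
--     """
--     Accepts "1-22", "1,2,7", or "1-10,12,18-20" -> [ints] (unique, ordered).
--     """
--     if not spec:
--         return []
--     out: list[int] = []
--     for tok in spec.split(","):
--         tok = tok.strip()
--         if not tok:
--             continue
--         if "-" in tok:
--             a, b = tok.split("-", 1)
--             try:
--                 a_i, b_i = int(a), int(b)
--                 out.extend(range(min(a_i, b_i), max(a_i, b_i) + 1))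
--             except Exception:
--                 pass
--         else:
--             try:
--                 out.append(int(tok))
--             except Exception:
--                 pass
--     # de-dupe keep order
--     seen: set[int] = set()
--     uniq: list[int] = []
--     for w in out:
--         if w not in seen:
--             seen.add(w)
--             uniq.append(w)
--     return uniq
-- ===== SOURCE B (Python) =====
-- def _weeks_of(tok: str) -> list[int]:
--     """Weeks contributed by one comma-separated token (empty/unparsable -> [])."""
--     tok = tok.strip()
--     if not tok:
--         return []
--     if "-" in tok:
--         a, b = tok.split("-", 1)
--         try:
--             lo, hi = sorted((int(a), int(b)))
--         except Exception:
--             return []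
--         return list(range(lo, hi + 1))
--     try:
--         return [int(tok)]
--     except Exception:
--         return []
--
--
-- def parse_weeks(spec: str) -> list[int]:
--     """
--     Accepts "1-22", "1,2,7", or "1-10,12,18-20" -> [ints] (unique, ordered).
--     Flat-maps a per-token helper, then de-duplicates WITHOUT any set:
--     repeatedly emit the head and filter every later duplicate out of the rest.
--     """
--     weeks = [w for tok in spec.split(",") for w in _weeks_of(tok)]
--     uniq: list[int] = []
--     while weeks:
--         head = weeks[0]
--         uniq.append(head)
--         weeks = [w for w in weeks[1:] if w != head]
--     return uniq
-- ===== Notes on version B (the rewrite author's own statement) =====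
-- stated objective: alternative
-- what changed: B flat-maps a per-token helper over the split tokens (no early return, no extend-loop) and de-duplicates without any seen set: a selection-style loop that repeatedly emits the current head and filters all later occurrences of it out of the remainder.
import Mathlib
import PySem

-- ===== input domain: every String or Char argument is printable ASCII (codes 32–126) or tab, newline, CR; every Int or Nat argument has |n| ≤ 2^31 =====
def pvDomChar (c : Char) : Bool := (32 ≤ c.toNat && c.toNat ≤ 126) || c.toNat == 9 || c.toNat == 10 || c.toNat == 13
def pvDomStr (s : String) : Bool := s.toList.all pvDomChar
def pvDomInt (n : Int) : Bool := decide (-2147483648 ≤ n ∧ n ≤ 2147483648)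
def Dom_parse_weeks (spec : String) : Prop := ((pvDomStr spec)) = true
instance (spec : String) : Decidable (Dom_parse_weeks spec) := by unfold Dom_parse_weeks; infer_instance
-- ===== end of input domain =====

-- B is an alternative decomposition: a per-token helper flat-mapped over the tokens,
-- then a set-free selection-style dedup (emit head, filter its later duplicates).

-- ===== PORT A =====
-- `a, b = tok.split("-", 1)` (the "-" guard makes exactly two parts)
def pwSplit2 (tok : String) : Option (String × String) :=
  match PySem.Str.splitMax? tok "-" 1 with
  | some [a, b] => some (a, b)
  | _ => none

-- `a_i, b_i = int(a), int(b)` inside try: both must parse, else the whole range is dropped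
def pwInt2? (a b : String) : Option (Int × Int) :=
  match PySem.Int.ofStr? a, PySem.Int.ofStr? b with
  | some ai, some bi => some (ai, bi)
  | _, _ => none

-- A: collect all parsed weeks into `out`, then a second loop de-dups via a seen set.
def parse_weeks (spec : String) : List Int :=
  if spec == "" then []
  else
    let out : List Int :=
      (PySem.Str.split? spec ",").getD [] |>.foldl (fun out tok =>
        let tok := PySem.Str.strip tok
        if tok == "" then out
        else if PySem.Str.isIn "-" tok then
          match pwSplit2 tok with
          | some (a, b) =>
            match pwInt2? a b with
            | some (ai, bi) =>
                out ++ PySem.List.pyRange (min ai bi) (max ai bi + 1) 1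
            | none => out
          | none => out
        else
          match PySem.Int.ofStr? tok with
          | some n => out ++ [n]
          | none => out) []
    (out.foldl
      (fun (p : PySem.Set Int × List Int) w =>
        if PySem.Set.contains p.1 w then p
        else (PySem.Set.add p.1 w, p.2 ++ [w]))
      (PySem.Set.empty, [])).2

-- ===== PORT B =====
-- `_weeks_of(tok)`: the weeks one token contributes.
-- `lo, hi = sorted((int(a), int(b)))` on a 2-tuple is exactly the conditional swap below.
def pwWeeksOf (tok : String) : List Int :=
  let tok := PySem.Str.strip tok
  if tok == "" then []
  else if PySem.Str.isIn "-" tok then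
    match pwSplit2 tok with
    | some (a, b) =>
      match pwInt2? a b with
      | some (ai, bi) =>
          let p := if ai ≤ bi then (ai, bi) else (bi, ai)
          PySem.List.pyRange p.1 (p.2 + 1) 1
      | none => []
    | none => []
  else
    match PySem.Int.ofStr? tok with
    | some n => [n]
    | none => []

-- the `while weeks:` dedup loop: emit the head, drop its later duplicates, repeat
def pwUniq : List Int → List Int
  | [] => []
  | h :: t => h :: pwUniq (t.filter (fun w => w != h))
termination_by l => l.length
decreasing_by
  simp only [List.length_cons, List.length_unattach]
  exact Nat.lt_succ_of_le (le_trans (List.length_filter_le _ _) (by simp))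

def parse_weeks_alt (spec : String) : List Int :=
  pwUniq (((PySem.Str.split? spec ",").getD []).flatMap pwWeeksOf)

-- ===== PRECONDITION & SPEC =====
def Spec_parse_weeks (spec : String) (out : List Int) : Prop := out = parse_weeks_alt spec
instance (spec : String) (out : List Int) : Decidable (Spec_parse_weeks spec out) := by unfold Spec_parse_weeks; infer_instance

-- ===== CLAIM =====
def Claim_equal_parse_weeks : Prop := ∀ (spec : String), Dom_parse_weeks spec → Spec_parse_weeks spec (parse_weeks spec)

-- ===== LEMMAS AND PROOFS =====

-- the list of weeks one token contributes in A's collection loop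
def pwPiece (tok : String) : List Int :=
  let tok := PySem.Str.strip tok
  if tok == "" then []
  else if PySem.Str.isIn "-" tok then
    match pwSplit2 tok with
    | some (a, b) =>
      match pwInt2? a b with
      | some (ai, bi) => PySem.List.pyRange (min ai bi) (max ai bi + 1) 1
      | none => []
    | none => []
  else
    match PySem.Int.ofStr? tok with
    | some n => [n]
    | none => []

theorem pwA_body (out : List Int) (tok : String) :
    (let tok := PySem.Str.strip tok
     if tok == "" then out
     else if PySem.Str.isIn "-" tok then
       match pwSplit2 tok with
       | some (a, b) =>
         match pwInt2? a b with
         | some (ai, bi) =>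
             out ++ PySem.List.pyRange (min ai bi) (max ai bi + 1) 1
         | none => out
       | none => out
     else
       match PySem.Int.ofStr? tok with
       | some n => out ++ [n]
       | none => out) = out ++ pwPiece tok := by
  unfold pwPiece
  dsimp only
  split_ifs with h1 h2
  · simp
  · rcases hs : pwSplit2 (PySem.Str.strip tok) with _ | ⟨a, b⟩
    · simp
    · rcases hi : pwInt2? a b with _ | ⟨ai, bi⟩ <;> simp [hi]
  · rcases hn : PySem.Int.ofStr? (PySem.Str.strip tok) with _ | n <;> simp

-- A's piece and B's helper agree: sorted((a,b)) on a 2-tuple = (min, max)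
theorem pwPiece_eq_weeksOf (tok : String) : pwPiece tok = pwWeeksOf tok := by
  unfold pwPiece pwWeeksOf
  dsimp only
  split_ifs with h1 h2
  · rfl
  · rcases hs : pwSplit2 (PySem.Str.strip tok) with _ | ⟨a, b⟩
    · rfl
    · rcases hi : pwInt2? a b with _ | ⟨ai, bi⟩
      · simp [hi]
      · simp only [hi]
        by_cases hle : ai ≤ bi <;> simp [hle, min_def, max_def]
  · rfl

-- A's dedup fold starting from seen-set s equals pwUniq of the not-yet-seen elements
theorem pw_fold_eq_uniq (xs : List Int) (s : PySem.Set Int) (r : List Int) :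
    (xs.foldl
      (fun (p : PySem.Set Int × List Int) w =>
        if PySem.Set.contains p.1 w then p
        else (PySem.Set.add p.1 w, p.2 ++ [w])) (s, r)).2
      = r ++ pwUniq (xs.filter (fun w => !PySem.Set.contains s w)) := by
  induction xs generalizing s r with
  | nil => simp [pwUniq]
  | cons x xs ih =>
      simp only [List.foldl_cons, List.filter_cons]
      by_cases hx : PySem.Set.contains s x = true
      · rw [if_pos hx, ih]
        have hb : (!PySem.Set.contains s x) = false := by rw [hx]; rfl
        rw [hb]
        simp
      · have hxf : PySem.Set.contains s x = false := eq_false_of_ne_true hx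
        have hxmem : x ∉ s := fun hm => hx ((PySem.Set.contains_iff s x).mpr hm)
        rw [if_neg hx, ih]
        have hb : (!PySem.Set.contains s x) = true := by rw [hxf]; rfl
        rw [hb]
        simp only [if_pos trivial]
        have hfil : xs.filter (fun w => !PySem.Set.contains (PySem.Set.add s x) w)
            = (xs.filter (fun w => !PySem.Set.contains s w)).filter (fun w => w != x) := by
          have hadd : PySem.Set.add s x = s ++ [x] := by
            unfold PySem.Set.add
            rw [hxf]
            simp
          rw [List.filter_filter]
          apply List.filter_congr
          intro w _
          by_cases hw : w = x
          · subst hw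
            simp [hadd]
          · simp [hadd, hw]
        rw [hfil, pwUniq]
        simp

theorem parse_weeks_spec : Claim_equal_parse_weeks := by
  intro spec _
  unfold Spec_parse_weeks parse_weeks parse_weeks_alt
  by_cases h : spec == ""
  · have h0 : spec = "" := by simpa using h
    subst h0
    have hB : (((PySem.Str.split? "" ",").getD []).flatMap pwWeeksOf) = [] := by decide
    rw [hB]
    simp [pwUniq]
  · simp only [h, Bool.false_eq_true, if_false]
    rw [funext fun out => funext fun tok => pwA_body out tok]
    rw [PySem.List.foldl_append_eq_flatMap]
    simp only [List.nil_append]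
    rw [show pwPiece = pwWeeksOf from funext pwPiece_eq_weeksOf]
    rw [pw_fold_eq_uniq]
    have hall : (((PySem.Str.split? spec ",").getD []).flatMap pwWeeksOf).filter
        (fun w => !PySem.Set.contains PySem.Set.empty w)
        = ((PySem.Str.split? spec ",").getD []).flatMap pwWeeksOf := by
      apply List.filter_eq_self.mpr
      intro a _
      simp [PySem.Set.empty, PySem.Set.contains]
    rw [hall]
    simp only [List.nil_append]

-- ===== VERDICT =====
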